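-- pv_equiv track=rewrite | github.com/sshpiz/french_conjugato | reference_pages.py | _build_usage_index
-- ===== SOURCE A (Python) =====
-- def _build_usage_index(usages):
--     index = {}
--     for usage in usages:
--         infinitive = (usage.get("verb") or "").strip()
--         if not infinitive:
--             continue
--         index.setdefault(infinitive, []).append(usage)
--     return index
-- ===== SOURCE B (Python) =====
-- def _build_usage_index(usages):
--     def key(u):
--         return (u.get("verb") or "").strip()
--
--     # first pass: the distinct non-empty keys in order of first appearance
--     seen = set()
--     keys = []
--     for u in usages:
--         k = key(u)
--         if k and k not in seen:
--             seen.add(k)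
--             keys.append(k)
--     # one filter pass per key builds each group
--     return {k: [u for u in usages if key(u) == k] for k in keys}
-- ===== Notes on version B (the rewrite author's own statement) =====
-- stated objective: alternative
-- what changed: B replaces A's single-pass dict of growing lists (setdefault+append) by a two-phase strategy: collect the distinct non-empty stripped keys in first-occurrence order, then build each group with a filter comprehension over the input.
import Mathlib
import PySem

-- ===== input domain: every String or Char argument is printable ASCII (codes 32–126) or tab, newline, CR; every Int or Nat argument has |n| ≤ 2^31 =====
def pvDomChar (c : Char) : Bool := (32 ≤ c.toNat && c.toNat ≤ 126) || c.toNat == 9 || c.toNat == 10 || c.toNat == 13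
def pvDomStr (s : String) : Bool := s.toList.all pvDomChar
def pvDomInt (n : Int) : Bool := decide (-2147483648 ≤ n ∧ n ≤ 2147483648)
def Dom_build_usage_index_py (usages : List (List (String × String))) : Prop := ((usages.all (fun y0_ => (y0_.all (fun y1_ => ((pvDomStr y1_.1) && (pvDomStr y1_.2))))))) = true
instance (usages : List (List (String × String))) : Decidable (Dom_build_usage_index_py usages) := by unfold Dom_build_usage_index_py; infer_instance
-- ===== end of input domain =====

-- B replaces A's single-pass dict of growing lists by a two-phase strategy (collect distinct keys
-- in first-occurrence order, then one filter pass per key); alternative decomposition, not faster.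


-- shared helper: `(usage.get("verb") or "").strip()` — `getD … ""` is exact: `.get` returns None
-- when the key is absent (`or` turns it into ""), and `"" or ""` is "" as well.
def pvKey (usage : List (String × String)) : String :=
  PySem.Str.strip ((PySem.Dict.mk usage).getD "verb" "")

-- ===== PORT A =====
-- one pass; `index.setdefault(infinitive, []).append(usage)` = modify with default []
def build_usage_index_py (usages : List (List (String × String))) : List (String × List (List (String × String))) :=
  (usages.foldl
    (fun index usage =>
      let infinitive := pvKey usage
      if infinitive == "" then index          -- `if not infinitive: continue`
      else index.modify infinitive [] (fun v => v ++ [usage]))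
    (PySem.Dict.empty)).items

-- ===== PORT B =====
-- B's `seen`/`keys` hold the same elements in the same order; PySem.Set keeps exactly that
-- first-occurrence list, so one Set plays both roles.
def build_usage_index_py_alt (usages : List (List (String × String))) : List (String × List (List (String × String))) :=
  let keys : PySem.Set String :=
    usages.foldl
      (fun ks u =>
        let k := pvKey u
        if k == "" then ks else PySem.Set.add ks k)
      []
  keys.map (fun k => (k, usages.filter (fun u => pvKey u == k)))

-- ===== PRECONDITION & SPEC =====
def Spec_build_usage_index_py (usages : List (List (String × String))) (out : List (String × List (List (String × String)))) : Prop := out = build_usage_index_py_alt usages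
instance (usages : List (List (String × String))) (out : List (String × List (List (String × String)))) : Decidable (Spec_build_usage_index_py usages out) := by unfold Spec_build_usage_index_py; infer_instance

-- ===== CLAIM (what is proved, stated in full; the proofs are below) =====
def Claim_equal_build_usage_index_py : Prop := ∀ (usages : List (List (String × String))), Dom_build_usage_index_py usages → Spec_build_usage_index_py usages (build_usage_index_py usages)

-- ===== LEMMAS AND PROOFS =====

-- A loop that skips elements with p is the plain loop over the filtered list.
theorem pv_foldl_skip {σ β : Type} (p : β → Bool) (g : σ → β → σ) (l : List β) (s : σ) :
    l.foldl (fun s u => if p u then s else g s u) s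
      = (l.filter (fun u => !(p u))).foldl g s := by
  induction l generalizing s with
  | nil => rfl
  | cons a t ih =>
      by_cases h : p a <;> simp [h, ih]

-- A's result, characterised: keys in first-occurrence order, each with its filter group.
theorem pv_A_eq (usages : List (List (String × String))) :
    build_usage_index_py usages
      = (PySem.Set.ofList ((usages.filter (fun u => !(pvKey u == ""))).map pvKey)).map
          (fun k => (k, (usages.filter (fun u => !(pvKey u == ""))).filter (fun u => pvKey u == k))) := by
  simp only [build_usage_index_py]
  rw [pv_foldl_skip (fun u => pvKey u == "") (fun (d : PySem.Dict String (List (List (String × String)))) u => d.modify (pvKey u) [] (fun v => v ++ [u])) usages PySem.Dict.empty]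
  set l := usages.filter (fun u => !(pvKey u == "")) with hl
  have hkeys : (l.foldl (fun d u => d.modify (pvKey u) [] (fun v => v ++ [u])) PySem.Dict.empty).keys
      = PySem.Set.ofList (l.map pvKey) := by
    rw [PySem.Dict.keys_foldl_modify_key l pvKey [] (fun _ u v => v ++ [u]) PySem.Dict.empty]
    simp [PySem.Dict.keys_empty, PySem.Set.update_nil_left]
  have hnd : (l.foldl (fun d u => d.modify (pvKey u) [] (fun v => v ++ [u])) PySem.Dict.empty).keys.Nodup := by
    exact PySem.Dict.nodup_keys_foldl_modify_key l pvKey [] (fun _ u v => v ++ [u]) PySem.Dict.empty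
      (by simp [PySem.Dict.keys_empty])
  rw [PySem.Dict.items_eq_map_keys _ hnd [], hkeys]
  refine List.map_congr_left (fun k _ => ?_)
  have hget : (l.foldl (fun d u => d.modify (pvKey u) [] (fun v => v ++ [u])) PySem.Dict.empty).getD k []
      = l.filter (fun u => pvKey u == k) := by
    have := PySem.Dict.getD_foldl_modify_append (l.map (fun u => (pvKey u, u))) PySem.Dict.empty k
    rw [List.foldl_map] at this
    simpa [List.filter_map, List.map_map, Function.comp_def] using this
  rw [hget]

-- B's result, in the same shape (group filters still over the full list).
theorem pv_B_eq (usages : List (List (String × String))) :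
    build_usage_index_py_alt usages
      = (PySem.Set.ofList ((usages.filter (fun u => !(pvKey u == ""))).map pvKey)).map
          (fun k => (k, usages.filter (fun u => pvKey u == k))) := by
  simp only [build_usage_index_py_alt]
  rw [pv_foldl_skip (fun u => pvKey u == "") (fun (ks : PySem.Set String) u => PySem.Set.add ks (pvKey u)) usages []]
  rw [← PySem.Set.update_map_eq_foldl_add, PySem.Set.update_nil_left]

-- Each key of the index is non-empty, so filtering out the empty-key usages first
-- does not change any group.
theorem pv_group_eq (usages : List (List (String × String))) (k : String) (hk : ¬ k = "") :
    (usages.filter (fun u => !(pvKey u == ""))).filter (fun u => pvKey u == k)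
      = usages.filter (fun u => pvKey u == k) := by
  rw [List.filter_filter]
  refine List.filter_congr (fun u _ => ?_)
  by_cases h : pvKey u = k
  · simp [h, hk]
  · simp [h]

-- ===== VERDICT (by name: the statement is the Claim_ definition above) =====
theorem build_usage_index_py_spec : Claim_equal_build_usage_index_py := by
  intro usages _
  unfold Spec_build_usage_index_py
  rw [pv_A_eq, pv_B_eq]
  refine List.map_congr_left (fun k hk => ?_)
  have hmem := (PySem.Set.mem_ofList _ k).mp hk
  obtain ⟨u, hu, hku⟩ := List.mem_map.mp hmem
  have hne : ¬ k = "" := by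
    have := List.of_mem_filter hu
    simp at this
    rw [← hku]; exact this
  rw [pv_group_eq usages k hne]
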